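-- pv_equiv track=rewrite | github.com/byeol3325/code_studying | 프로그래머스/2/12913. 땅따먹기/땅따먹기.py | solution
-- ===== SOURCE A (Python) =====
-- def solution(land):
--     answer = 0
--
--     col, row = len(land), len(land[0]) # col = 4로 고정
--     DP = [[0]*row for _ in range(col)]
--     DP[0] = land[0] # 첫줄 그대로
--
--     # DP[i-1][j] + DP[i][j] 는 안됨
--     for i in range(1, col):
--         for j in range(row):
--             DP[i][j] = land[i][j] + max(DP[i-1]) ### j 제외
--             if DP[i-1][j] + land[i][j] == DP[i][j]: # j가 포함됨
--                 DP[i][j] = land[i][j] + max(DP[i-1][:j] + DP[i-1][j+1:])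
--
--     return max(DP[-1])
-- ===== SOURCE B (Python) =====
-- def solution(land):
--     prev = land[0]
--     for row in land[1:]:
--         # top two values of prev in one pass
--         a, b = sorted(prev[:2], reverse=True)
--         for v in prev[2:]:
--             if v > a:
--                 a, b = v, a
--             elif v > b:
--                 b = v
--         prev = [v + (b if p == a else a) for p, v in zip(prev, row)]
--     return max(prev)
-- ===== Notes on version B (the rewrite author's own statement) =====
-- stated objective: faster
-- what changed: A rescans the whole previous DP row for every cell (max of the row, plus the row with column j sliced out); B computes the row's top-two values in one pass and picks max-excluding-j in O(1) per cell.
import Mathlib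
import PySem

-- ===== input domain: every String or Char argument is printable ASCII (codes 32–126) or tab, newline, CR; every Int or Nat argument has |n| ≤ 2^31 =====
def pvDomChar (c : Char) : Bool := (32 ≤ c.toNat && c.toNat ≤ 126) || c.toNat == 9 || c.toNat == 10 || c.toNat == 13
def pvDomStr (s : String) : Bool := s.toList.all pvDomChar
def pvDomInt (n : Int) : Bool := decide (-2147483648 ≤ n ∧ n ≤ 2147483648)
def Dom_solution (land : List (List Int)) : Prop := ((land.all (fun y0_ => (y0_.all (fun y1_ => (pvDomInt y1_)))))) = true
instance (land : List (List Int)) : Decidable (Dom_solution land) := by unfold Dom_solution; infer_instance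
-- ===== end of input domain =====

-- B replaces A's per-cell rescan of the previous DP row (max of the row, and max of the
-- row with column j sliced out) by one top-two scan per row, O(col*row) instead of O(col*row^2).

-- Python max(xs) on a list of ints (value only; Pre_ keeps the lists it is applied to nonempty)
def pymaxD (l : List Int) : Int := (PySem.List.max? l (fun y => y)).getD 0

-- ===== PORT A =====
def solution (land : List (List Int)) : Int :=
  let col : Int := land.length
  let row : Int := (PySem.List.pyGetD land 0 []).length
  let dp0 : List Int := PySem.List.pyGetD land 0 []
  let dpLast : List Int :=
    (PySem.List.pyRange 1 col 1).foldl
      (fun prev i =>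
        (PySem.List.pyRange 0 row 1).map (fun j =>
          let lij := PySem.List.pyGetD (PySem.List.pyGetD land i []) j 0
          let v := lij + pymaxD prev
          if PySem.List.pyGetD prev j 0 + lij = v then
            lij + pymaxD (PySem.List.slice prev none (some j) ++
                          PySem.List.slice prev (some (j + 1)) none)
          else v))
      dp0
  pymaxD dpLast

-- ===== PORT B =====
-- a, b = sorted(prev[:2], reverse=True); then the one-pass top-two scan over prev[2:]
def top2 (xs : List Int) : Int × Int :=
  match xs with
  | x :: y :: rest =>
    rest.foldl
      (fun ab v =>
        if ab.1 < v then (v, ab.1)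
        else if ab.2 < v then (ab.1, v)
        else ab)
      (max x y, min x y)
  | _ => (0, 0)  -- Python B raises here (unreached under Pre_)

def solution_alt (land : List (List Int)) : Int :=
  match land with
  | [] => 0  -- Python B raises on empty land (unreached under Pre_)
  | first :: rest =>
    let last : List Int :=
      rest.foldl
        (fun prev r =>
          let ab := top2 prev
          (prev.zip r).map (fun pv => pv.2 + (if pv.1 = ab.1 then ab.2 else ab.1)))
        first
    pymaxD last

-- ===== PRECONDITION & SPEC =====
-- Pre_ excludes exactly the inputs where A raises: empty land (IndexError), an empty first
-- row or a single-column land with ≥ 2 rows (max() of an empty sequence), and a later row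
-- shorter than the first (IndexError).
def Pre_solution (land : List (List Int)) : Prop :=
  land ≠ [] ∧ 1 ≤ (land.headD []).length ∧
  (2 ≤ land.length → 2 ≤ (land.headD []).length) ∧
  ∀ r ∈ land, (land.headD []).length ≤ r.length
instance (land : List (List Int)) : Decidable (Pre_solution land) := by unfold Pre_solution; infer_instance

def pvWitness_solution : List (List Int) := [[1, 2, 3, 5], [5, 6, 7, 8], [4, 3, 2, 1]]

def Spec_solution (land : List (List Int)) (out : Int) : Prop := out = solution_alt land
instance (land : List (List Int)) (out : Int) : Decidable (Spec_solution land out) := by unfold Spec_solution; infer_instance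

-- ===== CLAIM (what is proved, stated in full; the proofs are below) =====
def Claim_equal_solution : Prop := ∀ (land : List (List Int)), Dom_solution land → Pre_solution land → Spec_solution land (solution land)

-- ===== LEMMAS AND PROOFS =====

-- max value of a nonempty list, as a total function (0 on [] is never used under Pre_)
def fm (l : List Int) : Int := l.max?.getD 0

-- invariant of the top-two scan: the state is the top two elements (with multiplicity)
def Top2Inv (l : List Int) (ab : Int × Int) : Prop :=
  ab.2 ≤ ab.1 ∧ ∃ t, l.Perm (ab.1 :: ab.2 :: t) ∧ ∀ y ∈ t, y ≤ ab.2

theorem pymaxD_eq_fm (l : List Int) : pymaxD l = fm l := by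
  cases l with
  | nil => rfl
  | cons x t => rw [pymaxD, PySem.List.max?_id_cons, fm, List.max?_cons']

theorem max?_perm (l l' : List Int) (h : l.Perm l') : l.max? = l'.max? := by
  cases hm : l.max? with
  | none =>
    rw [List.max?_eq_none_iff] at hm
    subst hm
    rw [List.max?_eq_none_iff.mpr (List.Perm.eq_nil h.symm)]
  | some m =>
    rw [List.max?_eq_some_iff] at hm
    exact (List.max?_eq_some_iff.mpr ⟨h.mem_iff.mp hm.1, fun y hy => hm.2 y (h.mem_iff.mpr hy)⟩).symm

theorem fm_perm (l l' : List Int) (h : l.Perm l') : fm l = fm l' := by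
  rw [fm, fm, max?_perm l l' h]

theorem fm_eq_of (l : List Int) (m : Int) (hm : m ∈ l) (hle : ∀ y ∈ l, y ≤ m) : fm l = m := by
  rw [fm, List.max?_eq_some_iff.mpr ⟨hm, hle⟩]; rfl

theorem perm_snoc_cons (a b v : Int) (t : List Int) :
    (a :: b :: (t ++ [v])).Perm (v :: a :: b :: t) := by
  have h1 : (t ++ [v]).Perm (v :: t) := List.perm_append_singleton v t
  exact (((h1.cons b).cons a).trans ((List.Perm.swap v b t).cons a)).trans (List.Perm.swap v a (b :: t))

theorem top2Inv_step (l : List Int) (ab : Int × Int) (v : Int) (h : Top2Inv l ab) :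
    Top2Inv (l ++ [v])
      (if ab.1 < v then (v, ab.1) else if ab.2 < v then (ab.1, v) else ab) := by
  obtain ⟨hba, t, hperm, ht⟩ := h
  have hp : (l ++ [v]).Perm (ab.1 :: ab.2 :: (t ++ [v])) := by
    simpa using hperm.append_right [v]
  have hp2 : (l ++ [v]).Perm (v :: ab.1 :: ab.2 :: t) := hp.trans (perm_snoc_cons _ _ _ _)
  split_ifs with h1 h2
  · exact ⟨le_of_lt h1, ab.2 :: t, hp2, by
      intro y hy; rcases List.mem_cons.mp hy with rfl | hy
      · exact hba
      · exact le_trans (ht y hy) hba⟩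
  · refine ⟨not_lt.mp h1, ab.2 :: t, ?_, ?_⟩
    · exact hp2.trans (List.Perm.swap ab.1 v (ab.2 :: t))
    · intro y hy; rcases List.mem_cons.mp hy with rfl | hy
      · exact le_of_lt h2
      · exact le_of_lt (lt_of_le_of_lt (ht y hy) h2)
  · exact ⟨hba, t ++ [v], hp, by
      intro y hy; rcases List.mem_append.mp hy with hy | hy
      · exact ht y hy
      · simp at hy; subst hy; exact not_lt.mp h2⟩

theorem top2Inv_foldl (rest : List Int) : ∀ (l : List Int) (ab : Int × Int), Top2Inv l ab →
    Top2Inv (l ++ rest)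
      (rest.foldl (fun ab v => if ab.1 < v then (v, ab.1) else if ab.2 < v then (ab.1, v) else ab) ab) := by
  induction rest with
  | nil => intro l ab h; simpa using h
  | cons v rs ih =>
    intro l ab h
    have := ih (l ++ [v]) _ (top2Inv_step l ab v h)
    simpa [List.append_assoc] using this

theorem top2_inv (x y : Int) (rest : List Int) : Top2Inv (x :: y :: rest) (top2 (x :: y :: rest)) := by
  have hbase : Top2Inv [x, y] (max x y, min x y) := by
    refine ⟨min_le_max, [], ?_, by simp⟩
    rcases le_total x y with h | h
    · simp only [max_eq_right h, min_eq_left h]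
      exact List.Perm.swap y x []
    · simp [max_eq_left h, min_eq_right h]
  have := top2Inv_foldl rest [x, y] _ hbase
  simpa [top2] using this

theorem top2_fst (l : List Int) (h : Top2Inv l (top2 l)) : (top2 l).1 = fm l := by
  obtain ⟨hba, t, hperm, ht⟩ := h
  refine (fm_eq_of l (top2 l).1 (hperm.mem_iff.mpr (by simp)) ?_).symm
  intro y hy
  rcases List.mem_cons.mp (hperm.mem_iff.mp hy) with rfl | hy
  · exact le_refl _
  · rcases List.mem_cons.mp hy with rfl | hy
    · exact hba
    · exact le_trans (ht y hy) hba

-- the central fact: the max of the previous row with index j sliced out, via the top two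
theorem fm_eraseIdx (l : List Int) (j : Nat) (hj : j < l.length) (h : Top2Inv l (top2 l)) :
    fm (l.take j ++ l.drop (j + 1)) = if l[j] = (top2 l).1 then (top2 l).2 else (top2 l).1 := by
  obtain ⟨hba, t, hperm, ht⟩ := h
  have he : (l.take j ++ l.drop (j + 1)).Perm (l.erase l[j]) := by
    rw [← List.eraseIdx_eq_take_drop_succ]
    exact List.Perm.symm (List.erase_getElem hj)
  split_ifs with hA
  · rw [fm_perm _ _ he, hA, fm_perm _ _ (hperm.erase (top2 l).1), List.erase_cons_head]
    refine fm_eq_of _ _ (by simp) ?_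
    intro y hy
    rcases List.mem_cons.mp hy with rfl | hy
    · exact le_refl _
    · exact ht y hy
  · rw [fm_perm _ _ he, fm_perm _ _ (hperm.erase l[j])]
    rw [List.erase_cons_tail (by simpa using fun hc => hA (by simp [hc]))]
    refine fm_eq_of _ _ (by simp) ?_
    intro y hy
    rcases List.mem_cons.mp hy with rfl | hy
    · exact le_refl _
    · have hy' := List.erase_subset hy
      rcases List.mem_cons.mp hy' with rfl | hy''
      · exact hba
      · exact le_trans (ht y hy'') hba

-- one row step of A equals one row step of B
theorem row_eq (row0 : Nat) (prev r : List Int) (hp : prev.length = row0) (h2 : 2 ≤ row0)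
    (hr : row0 ≤ r.length) :
    (PySem.List.pyRange 0 (row0 : Int) 1).map (fun j =>
      if PySem.List.pyGetD prev j 0 + PySem.List.pyGetD r j 0 =
          PySem.List.pyGetD r j 0 + pymaxD prev then
        PySem.List.pyGetD r j 0 +
          pymaxD (PySem.List.slice prev none (some j) ++
                  PySem.List.slice prev (some (j + 1)) none)
      else PySem.List.pyGetD r j 0 + pymaxD prev) =
    (prev.zip r).map (fun pv => pv.2 + (if pv.1 = (top2 prev).1 then (top2 prev).2 else (top2 prev).1)) := by
  have htop : Top2Inv prev (top2 prev) := by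
    rcases prev with _ | ⟨x, _ | ⟨y, rest⟩⟩
    · simp at hp; omega
    · simp at hp; omega
    · exact top2_inv x y rest
  have hfst := top2_fst prev htop
  apply List.ext_getElem
  · simp [PySem.List.length_pyRange_one, hp]
    omega
  · intro k h1 h2'
    have hk : k < row0 := by simpa [PySem.List.length_pyRange_one] using h1
    have hkp : k < prev.length := by omega
    have hkr : k < r.length := by omega
    simp only [List.getElem_map, PySem.List.getElem_pyRange_one, List.getElem_zip, zero_add]
    have hcast : (k : Int) + 1 = ((k + 1 : Nat) : Int) := by push_cast; ring
    rw [PySem.List.pyGetD_natCast, PySem.List.pyGetD_natCast,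
        PySem.List.slice_to_natCast, hcast, PySem.List.slice_from_natCast,
        List.getD_eq_getElem _ _ hkr, List.getD_eq_getElem _ _ hkp]
    simp only [pymaxD_eq_fm]
    have hM := fm_eraseIdx prev k hkp htop
    by_cases hc : prev[k] = (top2 prev).1
    · rw [if_pos (show prev[k] + r[k] = r[k] + fm prev by rw [hc, hfst]; ring),
          hM, if_pos hc]
    · rw [if_neg (show ¬(prev[k] + r[k] = r[k] + fm prev) by rw [← hfst]; intro hcc; exact hc (by omega)),
          if_neg hc]
      omega

-- the whole DP loop of A equals B's fold, carrying the row-length invariant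
theorem iter_eq (row0 : Nat) (h2 : 2 ≤ row0) :
    ∀ (rest : List (List Int)) (prev : List Int), prev.length = row0 →
      (∀ r ∈ rest, row0 ≤ r.length) →
      rest.foldl (fun prev r =>
        (PySem.List.pyRange 0 (row0 : Int) 1).map (fun j =>
          if PySem.List.pyGetD prev j 0 + PySem.List.pyGetD r j 0 =
              PySem.List.pyGetD r j 0 + pymaxD prev then
            PySem.List.pyGetD r j 0 +
              pymaxD (PySem.List.slice prev none (some j) ++
                      PySem.List.slice prev (some (j + 1)) none)
          else PySem.List.pyGetD r j 0 + pymaxD prev)) prev =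
      rest.foldl (fun prev r =>
        (prev.zip r).map (fun pv =>
          pv.2 + (if pv.1 = (top2 prev).1 then (top2 prev).2 else (top2 prev).1))) prev := by
  intro rest
  induction rest with
  | nil => intro prev _ _; rfl
  | cons r rs ih =>
    intro prev hp hall
    have hr : row0 ≤ r.length := hall r (by simp)
    have hstep := row_eq row0 prev r hp h2 hr
    simp only [List.foldl_cons]
    rw [hstep]
    exact ih _ (by simp [List.length_zip, hp]; omega) (fun r' hr' => hall r' (by simp [hr']))


-- ===== VERDICT (by name: the statement is the Claim_ definition above) =====
theorem solution_spec : Claim_equal_solution := by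
  intro land _ hpre
  obtain ⟨hne, h1, h2, hall⟩ := hpre
  rcases land with _ | ⟨first, rest⟩
  · exact absurd rfl hne
  simp only [List.headD_cons] at h1 h2 hall
  unfold Spec_solution solution solution_alt
  simp only [PySem.List.pyGetD_zero_cons]
  rw [PySem.List.foldl_pyRange_pyGetD' (first :: rest) ([] : List Int)
      (fun prev r =>
        (PySem.List.pyRange 0 ((first.length : Nat) : Int) 1).map (fun j =>
          if PySem.List.pyGetD prev j 0 + PySem.List.pyGetD r j 0 =
              PySem.List.pyGetD r j 0 + pymaxD prev then
            PySem.List.pyGetD r j 0 +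
              pymaxD (PySem.List.slice prev none (some j) ++
                      PySem.List.slice prev (some (j + 1)) none)
          else PySem.List.pyGetD r j 0 + pymaxD prev))
      first (by omega : (0:Int) ≤ 1)]
  simp only [show ((1 : Int)).toNat = 1 from rfl, List.drop_succ_cons, List.drop_zero]
  rcases rest with _ | ⟨r2, rs⟩
  · rfl
  have h2' : 2 ≤ first.length := h2 (by simp)
  rw [iter_eq first.length h2' (r2 :: rs) first rfl
      (fun r hr => hall r (List.mem_cons_of_mem _ hr))]
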